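-- pv_equiv track=rewrite | github.com/phorkyas-tg/advent-of-code | aoc2018/PolymerScanner.py | GetShortestPolymerAfterImprovement
-- ===== SOURCE A (Python) =====
-- import string
--
-- def GenerateStringPairs():
--     uc = string.ascii_uppercase
--     lc = string.ascii_lowercase
--
--     stringPairs = []
--     for i in range(len(uc)):
--         stringPairs.extend(["{0}{1}".format(uc[i], lc[i]), "{1}{0}".format(uc[i], lc[i])])
--
--     return stringPairs
--
-- def CalculateLenAfterReactions(polymer):
--     stringPairs = GenerateStringPairs()
--
--     lastLength = len(polymer) + 1
--     while len(polymer) < lastLength: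
--         lastLength = len(polymer)
--         for sp in stringPairs:
--             polymer = polymer.replace(sp, "")
--
--     return len(polymer)
--
-- def GetShortestPolymerAfterImprovement(polymer):
--     minPolymerLength = len(polymer) + 1
--     for letter in string.ascii_lowercase:
--         # copy polymer
--         polymerTemp = "{:s}".format(polymer)
--
--         polymerTemp = polymerTemp.replace(letter, "")
--         polymerTemp = polymerTemp.replace(letter.upper(), "")
--
--         polymerLen = CalculateLenAfterReactions(polymerTemp)
--         if polymerLen < minPolymerLength:
--             minPolymerLength = polymerLen
--
--     return minPolymerLength
-- ===== SOURCE B (Python) =====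
-- import string
--
-- def GetShortestPolymerAfterImprovement(polymer):
--     def reduced_len(units):
--         stack = []
--         for c in units:
--             if stack and stack[-1] != c and stack[-1].lower() == c.lower():
--                 stack.pop()
--             else:
--                 stack.append(c)
--         return len(stack)
--     return min(reduced_len([c for c in polymer if c.lower() != ch])
--                for ch in string.ascii_lowercase)
-- ===== Notes on version B (the rewrite author's own statement) =====
-- stated objective: simpler
-- what changed: Replaces the 26x repeat-str.replace-until-length-stable fixpoint reduction with a 26x single-pass stack reduction (pop on reacting adjacent pair) and a min over the 26 stack sizes; equal by confluence of pair deletion. Not measurably faster in CPython: A's passes run in C.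
import Mathlib
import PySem

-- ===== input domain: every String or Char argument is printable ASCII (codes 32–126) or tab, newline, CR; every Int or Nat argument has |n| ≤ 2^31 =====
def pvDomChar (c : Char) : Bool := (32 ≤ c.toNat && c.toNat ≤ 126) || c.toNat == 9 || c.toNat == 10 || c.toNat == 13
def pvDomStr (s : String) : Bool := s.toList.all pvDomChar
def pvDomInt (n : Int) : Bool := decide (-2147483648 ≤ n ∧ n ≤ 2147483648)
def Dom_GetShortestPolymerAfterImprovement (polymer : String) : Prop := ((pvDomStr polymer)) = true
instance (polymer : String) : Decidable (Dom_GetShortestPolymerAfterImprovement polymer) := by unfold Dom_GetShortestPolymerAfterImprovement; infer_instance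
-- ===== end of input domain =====

-- B replaces A's 26 × (repeat 52 str.replace passes until stable) by a 26 × single stack pass;
-- equal results because pair-deletion is confluent (the stack normal form is invariant under deletions).

-- ===== PORT A =====
def pvUC : List Char :=
  ['A','B','C','D','E','F','G','H','I','J','K','L','M','N','O','P','Q','R','S','T','U','V','W','X','Y','Z']
def pvLC : List Char :=
  ['a','b','c','d','e','f','g','h','i','j','k','l','m','n','o','p','q','r','s','t','u','v','w','x','y','z']

def GenerateStringPairs : List String :=
  (List.range 26).foldl
    (fun acc i => acc ++ [String.ofList [pvUC.getD i ' ', pvLC.getD i ' '],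
                          String.ofList [pvLC.getD i ' ', pvUC.getD i ' ']]) []

-- the while loop of CalculateLenAfterReactions (terminates because lastLength strictly decreases)
def pvCalcLoop (pairs : List String) (polymer : String) (lastLength : Int) : Int :=
  if h : PySem.Str.len polymer < lastLength then
    pvCalcLoop pairs (pairs.foldl (fun q sp => PySem.Str.replace q sp "") polymer)
      (PySem.Str.len polymer)
  else PySem.Str.len polymer
termination_by lastLength.toNat
decreasing_by simp only [PySem.Str.len] at h ⊢; omega

def CalculateLenAfterReactions (polymer : String) : Int :=
  pvCalcLoop GenerateStringPairs polymer (PySem.Str.len polymer + 1)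

def GetShortestPolymerAfterImprovement (polymer : String) : Int :=
  pvLC.foldl
    (fun minPolymerLength letter =>
      let t1 := PySem.Str.replace polymer (String.ofList [letter]) ""
      let t2 := PySem.Str.replace t1 (String.ofList [PySem.Chars.upperChar letter]) ""
      let polymerLen := CalculateLenAfterReactions t2
      if polymerLen < minPolymerLength then polymerLen else minPolymerLength)
    (PySem.Str.len polymer + 1)

-- ===== PORT B =====
def pvStep (stack : List Char) (c : Char) : List Char :=
  match stack with
  | top :: rest =>
      if top ≠ c ∧ PySem.Chars.lowerChar top = PySem.Chars.lowerChar c then rest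
      else c :: top :: rest
  | [] => [c]

def pvReducedLen (units : List Char) : Int :=
  ((units.foldl pvStep []).length : Int)

def GetShortestPolymerAfterImprovement_alt (polymer : String) : Int :=
  let vals := pvLC.map (fun ch =>
    pvReducedLen (polymer.toList.filter (fun c => PySem.Chars.lowerChar c ≠ ch)))
  match PySem.List.min? vals (fun v => v) with
  | some v => v
  | none => 0

-- ===== PRECONDITION & SPEC =====
def Spec_GetShortestPolymerAfterImprovement (polymer : String) (out : Int) : Prop := out = GetShortestPolymerAfterImprovement_alt polymer
instance (polymer : String) (out : Int) : Decidable (Spec_GetShortestPolymerAfterImprovement polymer out) := by unfold Spec_GetShortestPolymerAfterImprovement; infer_instance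

-- ===== CLAIM (what is proved, stated in full; the proofs are below) =====
def Claim_equal_GetShortestPolymerAfterImprovement : Prop := ∀ (polymer : String), Dom_GetShortestPolymerAfterImprovement polymer → Spec_GetShortestPolymerAfterImprovement polymer (GetShortestPolymerAfterImprovement polymer)

-- ===== LEMMAS AND PROOFS =====

-- a reacting pair: same letter, opposite case (exactly the test in pvStep)
def pairB (a b : Char) : Prop := a ≠ b ∧ PySem.Chars.lowerChar a = PySem.Chars.lowerChar b
def pairBb (a b : Char) : Bool :=
  decide (a ≠ b) && decide (PySem.Chars.lowerChar a = PySem.Chars.lowerChar b)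

theorem pairBb_iff {a b : Char} : pairBb a b = true ↔ pairB a b := by
  simp [pairBb, pairB]

def pvPairsL : List (List Char) := GenerateStringPairs.map String.toList


def pvPartner (c : Char) : Char :=
  if PySem.Chars.islower c then PySem.Chars.upperChar c else PySem.Chars.lowerChar c

-- ASCII character facts, established once by computation over all codes < 127
theorem pvLD1 : pvPairsL.all (fun sp => match sp with
    | [x,y] => pairBb x y && pvDomChar x && pvDomChar y
    | _ => false) = true := by decide

set_option maxRecDepth 4096 in
theorem pvLD2 : ((List.range 127).all fun n => (List.range 127).all fun m =>
    !(pairBb (Char.ofNat n) (Char.ofNat m))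
      || decide ([Char.ofNat n, Char.ofNat m] ∈ pvPairsL)) = true := by decide

set_option maxRecDepth 4096 in
theorem pvLD3 : ((List.range 127).all fun n => (List.range 127).all fun m =>
    !(pairBb (Char.ofNat n) (Char.ofNat m))
      || decide (Char.ofNat m = pvPartner (Char.ofNat n))) = true := by decide

set_option maxRecDepth 4096 in
theorem pvLD4 : ((List.range 127).all fun n => (List.range 127).all fun m =>
    !(PySem.Chars.islower (Char.ofNat m))
      || (decide (PySem.Chars.lowerChar (Char.ofNat n) ≠ Char.ofNat m)
          == (decide (Char.ofNat n ≠ PySem.Chars.upperChar (Char.ofNat m))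
              && decide (Char.ofNat n ≠ Char.ofNat m)))) = true := by decide

theorem pvLD5 : pvLC.all (fun m => PySem.Chars.islower m && decide (m.toNat < 127)) = true := by
  decide

theorem pvCharLt127 (c : Char) (h : pvDomChar c = true) : c.toNat < 127 := by
  simp [pvDomChar] at h; omega

theorem pairB_symm {a b : Char} (h : pairB a b) : pairB b a := ⟨h.1.symm, h.2.symm⟩

theorem pairB_mem_pairsL {a b : Char} (ha : pvDomChar a = true) (hb : pvDomChar b = true)
    (h : pairB a b) : [a, b] ∈ pvPairsL := by
  have h2 := List.all_eq_true.mp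
    (List.all_eq_true.mp pvLD2 _ (List.mem_range.mpr (pvCharLt127 a ha))) _
    (List.mem_range.mpr (pvCharLt127 b hb))
  rw [Char.ofNat_toNat, Char.ofNat_toNat] at h2
  simpa [pairBb_iff.mpr h] using h2

theorem pairB_partner {a b : Char} (ha : pvDomChar a = true) (hb : pvDomChar b = true)
    (h : pairB a b) : b = pvPartner a := by
  have h2 := List.all_eq_true.mp
    (List.all_eq_true.mp pvLD3 _ (List.mem_range.mpr (pvCharLt127 a ha))) _
    (List.mem_range.mpr (pvCharLt127 b hb))
  rw [Char.ofNat_toNat, Char.ofNat_toNat] at h2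
  simpa [pairBb_iff.mpr h] using h2

theorem pairB_unique {a b c : Char} (ha : pvDomChar a = true) (hb : pvDomChar b = true)
    (hc : pvDomChar c = true) (h1 : pairB a b) (h2 : pairB a c) : b = c := by
  rw [pairB_partner ha hb h1, pairB_partner ha hc h2]

theorem mem_pairsL_spec {sp : List Char} (h : sp ∈ pvPairsL) :
    ∃ x y, sp = [x, y] ∧ pairB x y ∧ pvDomChar x = true ∧ pvDomChar y = true := by
  have h2 := List.all_eq_true.mp pvLD1 _ h
  match sp, h2 with
  | [x, y], h2 =>
    simp only [Bool.and_eq_true] at h2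
    exact ⟨x, y, rfl, pairBb_iff.mp h2.1.1, h2.1.2, h2.2⟩

theorem pvLD4' {c m : Char} (hc : c.toNat < 127) (hm : m.toNat < 127)
    (hml : PySem.Chars.islower m = true) :
    decide (PySem.Chars.lowerChar c ≠ m)
      = (decide (c ≠ PySem.Chars.upperChar m) && decide (c ≠ m)) := by
  have h2 := List.all_eq_true.mp
    (List.all_eq_true.mp pvLD4 _ (List.mem_range.mpr hc)) _ (List.mem_range.mpr hm)
  rw [Char.ofNat_toNat, Char.ofNat_toNat] at h2
  simpa [hml] using h2

theorem pvLD5' {m : Char} (hm : m ∈ pvLC) :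
    PySem.Chars.islower m = true ∧ m.toNat < 127 := by
  have h2 := List.all_eq_true.mp pvLD5 _ hm
  simpa using h2

def repl2 (x y : Char) : List Char → List Char
  | a :: b :: t => if a = x ∧ b = y then repl2 x y t else a :: repl2 x y (b :: t)
  | l => l

theorem gnil (f : Nat) (old new acc : List Char) :
    PySem.Chars.replace.go old new (f+1) [] acc = acc.reverse := by
  rw [PySem.Chars.replace.go]
  exact fun h => by omega

theorem go2 (x y : Char) : ∀ fuel l acc, l.length ≤ fuel →
    PySem.Chars.replace.go [x, y] [] fuel l acc = acc.reverse ++ repl2 x y l := by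
  intro fuel
  induction fuel with
  | zero =>
    intro l acc h
    match l with
    | [] => rw [PySem.Chars.replace.go]; simp [repl2]
    | c :: t => simp at h
  | succ f ih =>
    intro l acc h
    match l with
    | [] => rw [gnil]; simp [repl2]
    | [c] =>
      rw [PySem.Chars.replace.go]
      have hp : List.isPrefixOf [x, y] [c] = false := by simp [List.isPrefixOf]
      rw [hp, if_neg (by simp), ih [] (c :: acc) (by simp)]
      simp [repl2]
    | c :: b :: t =>
      rw [PySem.Chars.replace.go]
      have hp : List.isPrefixOf [x, y] (c :: b :: t) = (x == c && (y == b)) := by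
        simp only [List.isPrefixOf, Bool.and_true]
      rw [hp]
      by_cases hc : c = x ∧ b = y
      · rw [if_pos (by simp [hc.1, hc.2])]
        rw [show ([] : List Char).reverse ++ acc = acc from by simp]
        rw [show List.drop ([x,y].length) (c :: b :: t) = t from rfl]
        rw [ih t acc (by simp at h ⊢; omega)]
        simp [repl2, hc]
      · rw [if_neg (by
          simp only [Bool.and_eq_true, beq_iff_eq]
          rintro ⟨h1, h2⟩; exact hc ⟨h1.symm, h2.symm⟩)]
        rw [ih (b :: t) (c :: acc) (by simp at h ⊢; omega)]
        have : repl2 x y (c :: b :: t) = c :: repl2 x y (b :: t) := by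
          rw [repl2, if_neg hc]
        rw [this]; simp

theorem greplace2 (x y : Char) (l : List Char) :
    PySem.Chars.replace l [x, y] [] = repl2 x y l := by
  rw [PySem.Chars.replace]
  rw [if_neg (by simp), go2 x y l.length l [] le_rfl]
  simp

theorem go1 (x : Char) : ∀ fuel l acc, l.length ≤ fuel →
    PySem.Chars.replace.go [x] [] fuel l acc =
      acc.reverse ++ l.filter (fun c => c ≠ x) := by
  intro fuel
  induction fuel with
  | zero =>
    intro l acc h
    match l with
    | [] => rw [PySem.Chars.replace.go]; simp
    | c :: t => simp at h
  | succ f ih =>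
    intro l acc h
    match l with
    | [] => rw [gnil]; simp
    | c :: t =>
      rw [PySem.Chars.replace.go]
      have hp : List.isPrefixOf [x] (c :: t) = (x == c) := by
        simp only [List.isPrefixOf, List.isPrefixOf_nil_left, Bool.and_true]
      rw [hp]
      by_cases hc : c = x
      · rw [if_pos (by simp [hc])]
        rw [show ([] : List Char).reverse ++ acc = acc from by simp]
        rw [show List.drop ([x].length) (c :: t) = t from rfl]
        rw [ih t acc (by simp at h ⊢; omega)]
        simp [List.filter, hc]
      · rw [if_neg (by simp; exact fun h1 => hc h1.symm)]
        rw [ih t (c :: acc) (by simp at h ⊢; omega)]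
        simp [List.filter, hc]

theorem greplace1 (x : Char) (l : List Char) :
    PySem.Chars.replace l [x] [] = l.filter (fun c => c ≠ x) := by
  rw [PySem.Chars.replace]
  rw [if_neg (by simp), go1 x l.length l [] le_rfl]
  simp

theorem repl2_length_le (x y : Char) : ∀ l : List Char, (repl2 x y l).length ≤ l.length := by
  intro l
  induction l using repl2.induct x y with
  | case1 a b t hab ih => rw [repl2, if_pos hab]; simp; omega
  | case2 a b t hab ih => rw [repl2, if_neg hab]; simpa using ih
  | case3 l hl => cases l with
    | nil => simp [repl2]
    | cons a t => cases t with
      | nil => simp [repl2]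
      | cons b t' => exact absurd rfl (by intro h; exact (hl a b t' h).elim)

def hasOcc (x y : Char) : List Char → Bool
  | a :: b :: t => (decide (a = x) && decide (b = y)) || hasOcc x y (b :: t)
  | _ => false

theorem repl2_id_of_length (x y : Char) : ∀ l : List Char,
    l.length ≤ (repl2 x y l).length → repl2 x y l = l ∧ hasOcc x y l = false := by
  intro l
  induction l using repl2.induct x y with
  | case1 a b t hab ih =>
    intro h
    rw [repl2, if_pos hab] at h
    have := repl2_length_le x y t
    simp at h; omega
  | case2 a b t hab ih =>
    intro h
    rw [repl2, if_neg hab] at h ⊢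
    simp at h
    obtain ⟨h1, h2⟩ := ih h
    refine ⟨by rw [h1], ?_⟩
    rw [hasOcc, h2]
    simp; tauto
  | case3 l hl =>
    intro _
    cases l with
    | nil => simp [repl2, hasOcc]
    | cons a t => cases t with
      | nil => simp [repl2, hasOcc]
      | cons b t' => exact absurd rfl (by intro h; exact (hl a b t' h).elim)

theorem repl2_subset (x y : Char) : ∀ l : List Char, ∀ c ∈ repl2 x y l, c ∈ l := by
  intro l
  induction l using repl2.induct x y with
  | case1 a b t hab ih =>
    rw [repl2, if_pos hab]
    intro c hc; exact List.mem_cons_of_mem _ (List.mem_cons_of_mem _ (ih c hc))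
  | case2 a b t hab ih =>
    rw [repl2, if_neg hab]
    intro c hc
    rcases List.mem_cons.mp hc with h | h
    · exact h ▸ List.mem_cons_self
    · exact List.mem_cons_of_mem _ (ih c h)
  | case3 l hl => intro c hc
                  cases l with
                  | nil => simpa [repl2] using hc
                  | cons a t => cases t with
                    | nil => simpa [repl2] using hc
                    | cons b t' => exact absurd rfl (by intro h; exact (hl a b t' h).elim)

-- irreducibility: no adjacent reacting pair
def irred : List Char → Prop
  | a :: b :: t => ¬ pairB a b ∧ irred (b :: t)
  | _ => True

def InvS (st : List Char) : Prop := irred st ∧ ∀ c ∈ st, pvDomChar c = true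

theorem pvStep_eq_pair (st : List Char) {d : Char} {r : List Char} (c : Char)
    (hst : st = d :: r) (h : pairB d c) : pvStep st c = r := by
  subst hst
  show (if d ≠ c ∧ PySem.Chars.lowerChar d = PySem.Chars.lowerChar c then r else c :: d :: r) = r
  rw [if_pos (show d ≠ c ∧ PySem.Chars.lowerChar d = PySem.Chars.lowerChar c from h)]

theorem pvStep_eq_push (st : List Char) (c : Char)
    (h : ∀ d r, st = d :: r → ¬ pairB d c) : pvStep st c = c :: st := by
  match st with
  | [] => rfl
  | d :: r =>
    show (if d ≠ c ∧ PySem.Chars.lowerChar d = PySem.Chars.lowerChar c then r else c :: d :: r) = c :: d :: r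
    rw [if_neg (show ¬(d ≠ c ∧ PySem.Chars.lowerChar d = PySem.Chars.lowerChar c) from
      fun hh => h d r rfl hh)]

theorem irred_tail {a : Char} {t : List Char} (h : irred (a :: t)) : irred t := by
  cases t with
  | nil => trivial
  | cons b t' => exact (h.2 : irred (b :: t'))

theorem irred_cons {a : Char} {t : List Char}
    (ht : irred t) (h : ∀ b t', t = b :: t' → ¬ pairB a b) : irred (a :: t) := by
  cases t with
  | nil => trivial
  | cons b t' => exact ⟨h b t' rfl, ht⟩

theorem S1 {st : List Char} {c : Char} (h : InvS st) (hc : pvDomChar c = true) :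
    InvS (pvStep st c) := by
  obtain ⟨hi, hd⟩ := h
  match st with
  | [] =>
    refine ⟨trivial, ?_⟩
    intro e he
    have he' : e ∈ [c] := he
    rw [List.mem_singleton] at he'
    subst he'; exact hc
  | d :: r =>
    by_cases hp : pairB d c
    · rw [pvStep_eq_pair _ c rfl hp]
      exact ⟨irred_tail hi, fun e he => hd e (List.mem_cons_of_mem _ he)⟩
    · rw [pvStep_eq_push _ c (by rintro d' r' ⟨rfl, rfl⟩; exact hp)]
      refine ⟨irred_cons hi ?_, ?_⟩
      · rintro b t' ⟨rfl, rfl⟩ hpb; exact hp (pairB_symm hpb)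
      · intro e he
        rcases List.mem_cons.mp he with rfl | he
        · exact hc
        · exact hd e he

theorem S2 {st : List Char} {x y : Char} (h : InvS st)
    (hx : pvDomChar x = true) (hy : pvDomChar y = true) (hp : pairB x y) :
    pvStep (pvStep st x) y = st := by
  obtain ⟨hi, hd⟩ := h
  match st with
  | [] =>
    rw [show pvStep [] x = [x] from rfl, pvStep_eq_pair _ y rfl hp]
  | d :: r =>
    by_cases hdx : pairB d x
    · rw [pvStep_eq_pair _ x rfl hdx]
      have hdd : pvDomChar d = true := hd d List.mem_cons_self
      have hdy : d = y :=
        pairB_unique hx hdd hy (pairB_symm hdx) hp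
      subst hdy
      apply pvStep_eq_push
      rintro e r' rfl hpe
      exact (hi.1 : ¬ pairB d e) (pairB_symm hpe)
    · rw [pvStep_eq_push _ x (by rintro d' r' ⟨rfl, rfl⟩; exact hdx)]
      rw [pvStep_eq_pair _ y rfl hp]

theorem S3 {x y : Char} (hx : pvDomChar x = true) (hy : pvDomChar y = true)
    (hp : pairB x y) : ∀ l : List Char, ∀ st, InvS st → (∀ c ∈ l, pvDomChar c = true) →
    List.foldl pvStep st (repl2 x y l) = List.foldl pvStep st l := by
  intro l
  induction l using repl2.induct x y with
  | case1 a b t hab ih =>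
    intro st hst hdl
    rw [repl2, if_pos hab]
    rw [ih st hst (fun c hc => hdl c (List.mem_cons_of_mem _ (List.mem_cons_of_mem _ hc)))]
    show List.foldl pvStep st t = List.foldl pvStep (pvStep (pvStep st a) b) t
    rw [hab.1, hab.2, S2 hst hx hy hp]
  | case2 a b t hab ih =>
    intro st hst hdl
    rw [repl2, if_neg hab]
    show List.foldl pvStep (pvStep st a) (repl2 x y (b :: t)) =
      List.foldl pvStep (pvStep st a) (b :: t)
    exact ih (pvStep st a) (S1 hst (hdl a List.mem_cons_self))
      (fun c hc => hdl c (List.mem_cons_of_mem _ hc))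
  | case3 l hl =>
    intro st hst hdl
    cases l with
    | nil => simp [repl2]
    | cons a t => cases t with
      | nil => simp [repl2]
      | cons b t' => exact absurd rfl (by intro h; exact (hl a b t' h).elim)

theorem stk_irred : ∀ l : List Char, ∀ st, irred l →
    (∀ d r a t, st = d :: r → l = a :: t → ¬ pairB d a) →
    List.foldl pvStep st l = l.reverse ++ st := by
  intro l
  induction l with
  | nil => intro st _ _; simp
  | cons a t ih =>
    intro st hi hh
    rw [List.foldl_cons]
    rw [pvStep_eq_push st a (fun d r hdr => hh d r a t hdr rfl)]
    rw [ih (a :: st) (irred_tail hi) ?_]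
    · simp
    · rintro d r b t' ⟨rfl, rfl⟩ rfl
      exact ((hi.1 : ¬ pairB a b) ·)

theorem foldl_len_le : ∀ l : List Char, ∀ st,
    (List.foldl pvStep st l).length ≤ st.length + l.length := by
  intro l
  induction l with
  | nil => intro st; simp
  | cons a t ih =>
    intro st
    rw [List.foldl_cons]
    have h2 : (pvStep st a).length ≤ st.length + 1 := by
      match st with
      | [] => simp [pvStep]
      | d :: r =>
        show (if d ≠ a ∧ PySem.Chars.lowerChar d = PySem.Chars.lowerChar a
          then r else a :: d :: r).length ≤ (d :: r).length + 1
        split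
        · simp; omega
        · simp
    calc (List.foldl pvStep (pvStep st a) t).length
        ≤ (pvStep st a).length + t.length := ih _
      _ ≤ st.length + (a :: t).length := by simp at h2 ⊢; omega

theorem irred_of_noOcc : ∀ l : List Char,
    (∀ x y, [x, y] ∈ pvPairsL → hasOcc x y l = false) →
    (∀ c ∈ l, pvDomChar c = true) → irred l := by
  intro l
  induction l with
  | nil => intro _ _; trivial
  | cons a t ih =>
    intro hno hd
    cases t with
    | nil => trivial
    | cons b t' =>
      refine ⟨?_, ih ?_ (fun c hc => hd c (List.mem_cons_of_mem _ hc))⟩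
      · intro hp
        have hm := pairB_mem_pairsL (hd a List.mem_cons_self)
          (hd b (List.mem_cons_of_mem _ List.mem_cons_self)) hp
        have := hno a b hm
        rw [hasOcc] at this
        simp at this
      · intro x y hm
        have := hno x y hm
        rw [hasOcc] at this
        simp at this
        exact this.2

-- one full pass (the inner for-loop of CalculateLenAfterReactions), list side
theorem passG_len : ∀ ps : List (List Char), (∀ sp ∈ ps, sp ∈ pvPairsL) →
    ∀ l : List Char,
    (ps.foldl (fun q sp => PySem.Chars.replace q sp []) l).length ≤ l.length := by
  intro ps
  induction ps with
  | nil => intro _ l; simp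
  | cons sp ps ih =>
    intro hps l
    obtain ⟨x, y, rfl, _, _, _⟩ := mem_pairsL_spec (hps sp List.mem_cons_self)
    rw [List.foldl_cons, greplace2]
    calc (ps.foldl (fun q sp => PySem.Chars.replace q sp []) (repl2 x y l)).length
        ≤ (repl2 x y l).length := ih (fun s hs => hps s (List.mem_cons_of_mem _ hs)) _
      _ ≤ l.length := repl2_length_le x y l

theorem passG_sub : ∀ ps : List (List Char), (∀ sp ∈ ps, sp ∈ pvPairsL) →
    ∀ l : List Char, ∀ c ∈ ps.foldl (fun q sp => PySem.Chars.replace q sp []) l, c ∈ l := by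
  intro ps
  induction ps with
  | nil => intro _ l c hc; simpa using hc
  | cons sp ps ih =>
    intro hps l c hc
    obtain ⟨x, y, rfl, _, _, _⟩ := mem_pairsL_spec (hps sp List.mem_cons_self)
    rw [List.foldl_cons, greplace2] at hc
    exact repl2_subset x y l c (ih (fun s hs => hps s (List.mem_cons_of_mem _ hs)) _ c hc)

theorem passG_stk : ∀ ps : List (List Char), (∀ sp ∈ ps, sp ∈ pvPairsL) →
    ∀ l : List Char, (∀ c ∈ l, pvDomChar c = true) →
    List.foldl pvStep [] (ps.foldl (fun q sp => PySem.Chars.replace q sp []) l) =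
      List.foldl pvStep [] l := by
  intro ps
  induction ps with
  | nil => intro _ l _; rfl
  | cons sp ps ih =>
    intro hps l hd
    obtain ⟨x, y, rfl, hp, hx, hy⟩ := mem_pairsL_spec (hps sp List.mem_cons_self)
    rw [List.foldl_cons, greplace2]
    rw [ih (fun s hs => hps s (List.mem_cons_of_mem _ hs)) _
      (fun c hc => hd c (repl2_subset x y l c hc))]
    exact S3 hx hy hp l [] ⟨trivial, by simp⟩ hd

theorem passG_fix : ∀ ps : List (List Char), (∀ sp ∈ ps, sp ∈ pvPairsL) →
    ∀ l : List Char,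
    l.length ≤ (ps.foldl (fun q sp => PySem.Chars.replace q sp []) l).length →
    ps.foldl (fun q sp => PySem.Chars.replace q sp []) l = l ∧
      (∀ x y, [x, y] ∈ ps → hasOcc x y l = false) := by
  intro ps
  induction ps with
  | nil => intro _ l _; exact ⟨rfl, by simp⟩
  | cons sp ps ih =>
    intro hps l hlen
    obtain ⟨x, y, rfl, hp, hx, hy⟩ := mem_pairsL_spec (hps sp List.mem_cons_self)
    rw [List.foldl_cons, greplace2] at hlen ⊢
    have h1 : l.length ≤ (repl2 x y l).length := by
      calc l.length ≤ _ := hlen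
        _ ≤ (repl2 x y l).length :=
          passG_len ps (fun s hs => hps s (List.mem_cons_of_mem _ hs)) _
    obtain ⟨hid, hno⟩ := repl2_id_of_length x y l h1
    rw [hid] at hlen ⊢
    obtain ⟨hid2, hno2⟩ := ih (fun s hs => hps s (List.mem_cons_of_mem _ hs)) l hlen
    refine ⟨hid2, ?_⟩
    intro x' y' hm
    rcases List.mem_cons.mp hm with h | h
    · cases h; exact hno
    · exact hno2 x' y' h

theorem strPass_toList : ∀ ps : List String, ∀ P : String,
    (ps.foldl (fun q sp => PySem.Str.replace q sp "") P).toList =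
      (ps.map String.toList).foldl (fun l sp => PySem.Chars.replace l sp []) P.toList := by
  intro ps
  induction ps with
  | nil => intro P; rfl
  | cons sp ps ih =>
    intro P
    rw [List.foldl_cons, ih, List.map_cons, List.foldl_cons]
    rw [PySem.Str.toList_replace]
    rfl

theorem loopW : ∀ n : Nat, ∀ (last : Int) (P : String), last.toNat = n →
    (∀ c ∈ P.toList, pvDomChar c = true) → PySem.Str.len P < last →
    pvCalcLoop GenerateStringPairs P last = ((P.toList.foldl pvStep []).length : Int) := by
  intro n
  induction n using Nat.strong_induction_on with
  | _ n ih =>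
    intro last P hn hdom hlt
    rw [pvCalcLoop, dif_pos hlt]
    set Q := GenerateStringPairs.foldl (fun q sp => PySem.Str.replace q sp "") P with hQ
    have hQl : Q.toList = pvPairsL.foldl (fun l sp => PySem.Chars.replace l sp []) P.toList :=
      strPass_toList _ _
    have hmem : ∀ sp ∈ pvPairsL, sp ∈ pvPairsL := fun _ h => h
    have hlen : Q.toList.length ≤ P.toList.length := by rw [hQl]; exact passG_len _ hmem _
    have hstk : Q.toList.foldl pvStep [] = P.toList.foldl pvStep [] := by
      rw [hQl]; exact passG_stk _ hmem _ hdom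
    have hdomQ : ∀ c ∈ Q.toList, pvDomChar c = true := by
      intro c hc; rw [hQl] at hc; exact hdom c (passG_sub _ hmem _ c hc)
    by_cases hcase : Q.toList.length < P.toList.length
    · have hlast : PySem.Str.len Q < PySem.Str.len P := by
        simp only [PySem.Str.len]; exact_mod_cast hcase
      have hn' : (PySem.Str.len P).toNat < n := by
        simp only [PySem.Str.len] at hlt ⊢
        omega
      rw [ih _ hn' _ _ rfl hdomQ hlast, hstk]
    · -- the pass did not shrink: fixpoint reached, P is irreducible
      have hge : P.toList.length ≤ (pvPairsL.foldl (fun l sp => PySem.Chars.replace l sp []) P.toList).length := by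
        rw [← hQl]; omega
      obtain ⟨hfix, hno⟩ := passG_fix _ hmem _ hge
      have hirr : irred P.toList :=
        irred_of_noOcc _ (fun x y hm => hno x y hm) hdom
      have hQP : Q.toList = P.toList := by rw [hQl, hfix]
      rw [pvCalcLoop, dif_neg (by
        simp only [PySem.Str.len, hQP]
        omega)]
      have : P.toList.foldl pvStep [] = P.toList.reverse ++ [] :=
        stk_irred _ _ hirr (by rintro d r a t h _; cases h)
      simp only [PySem.Str.len, hQP, this]
      simp

-- the per-letter value computed by A equals B's stack length
theorem perLetter (P : String) (hdom : ∀ c ∈ P.toList, pvDomChar c = true)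
    (ch : Char) (hch : ch ∈ pvLC) :
    CalculateLenAfterReactions
        (PySem.Str.replace (PySem.Str.replace P (String.ofList [ch]) "")
          (String.ofList [PySem.Chars.upperChar ch]) "")
      = pvReducedLen (P.toList.filter (fun c => PySem.Chars.lowerChar c ≠ ch)) ∧
    pvReducedLen (P.toList.filter (fun c => PySem.Chars.lowerChar c ≠ ch))
      ≤ (P.toList.length : Int) := by
  obtain ⟨hml, hm127⟩ := pvLD5' hch
  set t2 := PySem.Str.replace (PySem.Str.replace P (String.ofList [ch]) "")
    (String.ofList [PySem.Chars.upperChar ch]) "" with ht2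
  have ht2l : t2.toList = P.toList.filter (fun c => PySem.Chars.lowerChar c ≠ ch) := by
    rw [ht2, PySem.Str.toList_replace, PySem.Str.toList_replace]
    have e1 : (String.ofList [ch]).toList = [ch] := String.toList_ofList
    have e2 : (String.ofList [PySem.Chars.upperChar ch]).toList
        = [PySem.Chars.upperChar ch] := String.toList_ofList
    have e3 : ("" : String).toList = [] := rfl
    rw [e1, e2, e3, greplace1, greplace1, List.filter_filter]
    apply List.filter_congr
    intro c hc
    exact (pvLD4' (pvCharLt127 c (hdom c hc)) hm127 hml).symm
  have hdom2 : ∀ c ∈ t2.toList, pvDomChar c = true := by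
    intro c hc
    rw [ht2l] at hc
    exact hdom c (List.mem_of_mem_filter hc)
  constructor
  · rw [CalculateLenAfterReactions]
    rw [loopW (PySem.Str.len t2 + 1).toNat _ _ rfl hdom2 (by omega)]
    rw [ht2l, pvReducedLen]
  · rw [pvReducedLen]
    have h1 := foldl_len_le (P.toList.filter (fun c => PySem.Chars.lowerChar c ≠ ch)) []
    have h1' : (List.foldl pvStep []
        (P.toList.filter (fun c => PySem.Chars.lowerChar c ≠ ch))).length
        ≤ (P.toList.filter (fun c => PySem.Chars.lowerChar c ≠ ch)).length := by
      simpa only [List.length_nil, Nat.zero_add] using h1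
    have h2 := List.length_filter_le (fun c : Char => decide (PySem.Chars.lowerChar c ≠ ch)) P.toList
    exact_mod_cast le_trans h1' h2

set_option maxHeartbeats 2000000 in
theorem main (P : String) (hdom : ∀ c ∈ P.toList, pvDomChar c = true) :
    GetShortestPolymerAfterImprovement P = GetShortestPolymerAfterImprovement_alt P := by
  have hbound : ∀ ch ∈ pvLC,
      pvReducedLen (P.toList.filter (fun c => PySem.Chars.lowerChar c ≠ ch))
        ≤ (P.toList.length : Int) :=
    fun ch hch => (perLetter P hdom ch hch).2
  have hcongr : List.foldl
      (fun minPolymerLength letter =>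
        let t1 := PySem.Str.replace P (String.ofList [letter]) ""
        let t2 := PySem.Str.replace t1 (String.ofList [PySem.Chars.upperChar letter]) ""
        let polymerLen := CalculateLenAfterReactions t2
        if polymerLen < minPolymerLength then polymerLen else minPolymerLength)
      (PySem.Str.len P + 1) pvLC
      = List.foldl
        (fun m ch => min m (pvReducedLen (P.toList.filter (fun c => PySem.Chars.lowerChar c ≠ ch))))
        (PySem.Str.len P + 1) pvLC := by
    apply PySem.List.foldl_congr_mem
    intro m ch hch
    show (if CalculateLenAfterReactions
        (PySem.Str.replace (PySem.Str.replace P (String.ofList [ch]) "")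
          (String.ofList [PySem.Chars.upperChar ch]) "") < m
      then CalculateLenAfterReactions
        (PySem.Str.replace (PySem.Str.replace P (String.ofList [ch]) "")
          (String.ofList [PySem.Chars.upperChar ch]) "")
      else m) = _
    rw [(perLetter P hdom ch hch).1, min_def]
    split_ifs <;> omega
  rw [GetShortestPolymerAfterImprovement, hcongr]
  show _ = (match PySem.List.min? (pvLC.map (fun ch =>
      pvReducedLen (P.toList.filter (fun c => PySem.Chars.lowerChar c ≠ ch)))) (fun v => v) with
    | some v => v
    | none => 0)
  rw [show pvLC = 'a' :: ['b','c','d','e','f','g','h','i','j','k','l','m','n','o','p','q','r','s','t','u','v','w','x','y','z'] from rfl]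
  rw [List.map_cons, PySem.List.min?_id_cons, List.foldl_cons, List.foldl_map]
  have hM : PySem.Str.len P = (P.toList.length : Int) := rfl
  have h0 : min (PySem.Str.len P + 1)
      (pvReducedLen (P.toList.filter (fun c => PySem.Chars.lowerChar c ≠ 'a')))
      = pvReducedLen (P.toList.filter (fun c => PySem.Chars.lowerChar c ≠ 'a')) := by
    have := hbound 'a' (by decide)
    rw [min_eq_right (by omega)]
  rw [h0]


-- ===== VERDICT (by name: the statement is the Claim_ definition above) =====
theorem GetShortestPolymerAfterImprovement_spec : Claim_equal_GetShortestPolymerAfterImprovement := by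
  intro polymer hdom
  show GetShortestPolymerAfterImprovement polymer = GetShortestPolymerAfterImprovement_alt polymer
  apply main
  intro c hc
  exact List.all_eq_true.mp hdom c hc
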